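-- pv_equiv track=rewrite | github.com/chang/jrnl | jrnl_server/jrnl_helpers.py | _get_day_with_suffix
-- ===== SOURCE A (Python) =====
-- def _get_day_with_suffix(day):
--     """
--     Returns:
--         (day, suffix): (TUPLE[STR, STR])
--     """
--     assert isinstance(day, int) and 0 < day <= 31
--     SUFFIXES = {
--         1: 'st',
--         2: 'nd',
--         3: 'rd',
--         4: 'th',
--         21: 'st',
--         22: 'nd',
--         23: 'rd',
--         24: 'th',
--         31: 'st',
--     }
--     suffix_day = day
--     while True:
--         if suffix_day in SUFFIXES:
--             suffix = SUFFIXES[suffix_day]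
--             return (str(day), suffix)
--         suffix_day -= 1
-- ===== SOURCE B (Python) =====
-- def _get_day_with_suffix(day):
--     """
--     Returns:
--         (day, suffix): (TUPLE[STR, STR])
--     """
--     assert isinstance(day, int) and 0 < day <= 31
--     if day % 100 in (11, 12, 13):
--         suffix = 'th'
--     else:
--         suffix = {1: 'st', 2: 'nd', 3: 'rd'}.get(day % 10, 'th')
--     return (str(day), suffix)
-- ===== Notes on version B (the rewrite author's own statement) =====
-- stated objective: idiomatic
-- what changed: Replaces the dict-plus-backward-scan lookup (decrement until a key hits) with the closed-form ordinal-suffix rule: teens (day % 100 in 11..13) get 'th', otherwise branch on day % 10.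
import Mathlib
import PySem

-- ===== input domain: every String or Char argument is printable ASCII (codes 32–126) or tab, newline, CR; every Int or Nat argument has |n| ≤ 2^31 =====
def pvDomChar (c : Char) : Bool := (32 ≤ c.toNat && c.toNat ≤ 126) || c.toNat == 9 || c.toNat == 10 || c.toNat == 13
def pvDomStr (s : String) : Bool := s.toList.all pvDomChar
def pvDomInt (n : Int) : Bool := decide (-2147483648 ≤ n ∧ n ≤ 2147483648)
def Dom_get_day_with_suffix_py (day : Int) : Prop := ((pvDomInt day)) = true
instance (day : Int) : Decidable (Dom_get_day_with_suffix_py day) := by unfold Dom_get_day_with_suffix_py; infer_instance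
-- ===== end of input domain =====

-- B replaces A's dict-plus-backward-scan with the closed-form ordinal-suffix rule (teens -> 'th', else day % 10): more idiomatic, same values.


-- ===== PORT A =====
-- A's SUFFIXES dict
def pySuffixesA : PySem.Dict Int String :=
  PySem.Dict.ofList [(1, "st"), (2, "nd"), (3, "rd"), (4, "th"),
                     (21, "st"), (22, "nd"), (23, "rd"), (24, "th"), (31, "st")]

-- A's 'while True' loop: decrement suffix_day until it is a key of SUFFIXES.
-- Fuel makes the recursion structural; with 0 < day ≤ 31 (Pre_) 32 steps always suffice,
-- so the fuel-exhausted default is never reached on admitted inputs.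
def scanA (day : Int) : Nat → Int → String × String
  | 0, _ => ("", "")
  | fuel + 1, sd =>
    match PySem.Dict.get? pySuffixesA sd with
    | some s => (PySem.Int.toStr day, s)
    | none => scanA day fuel (sd - 1)

def get_day_with_suffix_py (day : Int) : String × String :=
  scanA day 32 day

-- ===== PORT B =====
def get_day_with_suffix_py_alt (day : Int) : String × String :=
  let suffix :=
    if PySem.Int.mod day 100 = 11 ∨ PySem.Int.mod day 100 = 12 ∨ PySem.Int.mod day 100 = 13 then
      "th"
    else
      PySem.Dict.getD (PySem.Dict.ofList [(1, "st"), (2, "nd"), (3, "rd")]) (PySem.Int.mod day 10) "th"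
  (PySem.Int.toStr day, suffix)

-- ===== PRECONDITION & SPEC =====
-- Pre_: A's assert (0 < day <= 31) raises AssertionError outside this range.
def Pre_get_day_with_suffix_py (day : Int) : Prop := 0 < day ∧ day ≤ 31
instance (day : Int) : Decidable (Pre_get_day_with_suffix_py day) := by
  unfold Pre_get_day_with_suffix_py; infer_instance
def pvWitness_get_day_with_suffix_py : Int := 17

def Spec_get_day_with_suffix_py (day : Int) (out : String × String) : Prop := out = get_day_with_suffix_py_alt day
instance (day : Int) (out : String × String) : Decidable (Spec_get_day_with_suffix_py day out) := by unfold Spec_get_day_with_suffix_py; infer_instance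

-- ===== CLAIM (what is proved, stated in full; the proofs are below) =====
def Claim_equal_get_day_with_suffix_py : Prop := ∀ (day : Int), Dom_get_day_with_suffix_py day → Pre_get_day_with_suffix_py day → Spec_get_day_with_suffix_py day (get_day_with_suffix_py day)

-- ===== LEMMAS AND PROOFS =====

-- ===== VERDICT (by name: the statement is the Claim_ definition above) =====
theorem get_day_with_suffix_py_spec : Claim_equal_get_day_with_suffix_py := by
  intro day _ hpre
  obtain ⟨h1, h2⟩ := hpre
  unfold Spec_get_day_with_suffix_py
  interval_cases day <;> decide
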